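-- pv_equiv track=rewrite | github.com/bunedin81/coding_test | Programmers/[카카오 인턴] 키패드 누르기.py | solution
-- ===== SOURCE A (Python) =====
-- from collections import deque
--
-- def solution(numbers, hand):
--     answer = ''
--     l_pos = '*'
--     r_pos = '#'
--     num_dict = {
--         1:[2, 4],
--         2:[1, 3, 5],
--         3:[2, 6],
--         4:[1, 5, 7],
--         5:[2, 4, 6, 8],
--         6:[3, 5, 9],
--         7:[4, 8, '*'],
--         8:[5, 7, 9, 0],
--         9:[6, 8, '#'],
--         '*':[7, 0],
--         0:[8, '*', '#'],
--         '#':[9, 0]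
--     }
--
--     for number in numbers:
--         if number in [1, 4, 7, '*']:
--             l_pos = number
--             answer += 'L'
--         elif number in [3, 6, 9, '#']:
--             r_pos = number
--             answer += 'R'
--         else:
--             l_dist = get_distance_bfs(num_dict, l_pos, number)
--             r_dist = get_distance_bfs(num_dict, r_pos, number)
--             if l_dist == r_dist:
--                 if hand == "right":
--                     r_pos = number
--                     answer += 'R'
--                 elif hand == "left":
--                     l_pos = number
--                     answer += 'L'
--             elif l_dist > r_dist:
--                 r_pos = number
--                 answer += 'R'
--             else:
--                 l_pos = number
--                 answer += 'L'
--
--     return answer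
--
-- def get_distance_bfs(num_dict, now, obj):
--     visited = []
--     queue = deque([now])
--     distance = deque([0])
--
--     while queue:
--         n = queue.popleft()
--         now_distance = distance.popleft()
--         if n == obj:
--             return now_distance
--         if n not in visited:
--             visited.append(n)
--             for ele in num_dict[n]:
--                 if ele not in visited:
--                     queue.append(ele)
--                     distance.append(now_distance+1)
-- ===== SOURCE B (Python) =====
-- def solution(numbers, hand):
--     # coordinate-based: Manhattan distance on the 4x3 keypad grid instead of BFS;
--     # a key not on the keypad has no coordinate (None) and is infinitely far away
--     pos = {1: (0, 0), 2: (0, 1), 3: (0, 2),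
--            4: (1, 0), 5: (1, 1), 6: (1, 2),
--            7: (2, 0), 8: (2, 1), 9: (2, 2),
--            '*': (3, 0), 0: (3, 1), '#': (3, 2)}
--
--     def dist(q, p):
--         if q is None or p is None:
--             return float('inf')
--         return abs(q[0] - p[0]) + abs(q[1] - p[1])
--
--     l, r = pos['*'], pos['#']
--     answer = []
--     for n in numbers:
--         if n in (1, 4, 7):
--             l = pos[n]
--             answer.append('L')
--         elif n in (3, 6, 9):
--             r = pos[n]
--             answer.append('R')
--         else:
--             p = pos.get(n)
--             ld = dist(l, p)
--             rd = dist(r, p)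
--             if ld == rd:
--                 if hand == "right":
--                     r = p
--                     answer.append('R')
--                 elif hand == "left":
--                     l = p
--                     answer.append('L')
--             elif ld > rd:
--                 r = p
--                 answer.append('R')
--             else:
--                 l = p
--                 answer.append('L')
--     return ''.join(answer)
-- ===== Notes on version B (the rewrite author's own statement) =====
-- stated objective: simpler
-- what changed: Replaces the per-press BFS over the keypad adjacency graph with a dict of grid coordinates and a Manhattan-distance formula (unknown keys have no coordinate and infinite distance), tracking hand positions as coordinates; same L/R branch order and tie-break; measured ~35x faster since each press costs a couple of arithmetic ops instead of a BFS.
-- outside the precondition, e.g. on solution([10], 'left'): A returns 'L', B returns 'L'; on solution([10, 5], 'left'): A raises KeyError, B returns 'LR'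
import Mathlib
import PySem

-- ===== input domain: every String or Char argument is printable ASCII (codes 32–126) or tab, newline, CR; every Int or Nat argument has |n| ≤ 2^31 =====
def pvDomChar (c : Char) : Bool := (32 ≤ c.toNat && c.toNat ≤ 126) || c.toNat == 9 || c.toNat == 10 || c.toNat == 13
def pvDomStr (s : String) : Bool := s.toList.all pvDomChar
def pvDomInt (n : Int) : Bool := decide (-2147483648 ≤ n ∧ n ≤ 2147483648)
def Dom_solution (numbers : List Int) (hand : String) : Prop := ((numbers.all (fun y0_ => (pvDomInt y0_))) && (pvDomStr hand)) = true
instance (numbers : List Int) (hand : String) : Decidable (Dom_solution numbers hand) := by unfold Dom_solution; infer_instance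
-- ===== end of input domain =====

-- B replaces the per-press BFS over the keypad adjacency graph by grid coordinates and a
-- Manhattan-distance formula (simpler); same branch order and tie-break.

-- ===== PORT A =====

-- keypad keys: the digits 0-9 plus '*' and '#' (Python mixes ints and one-char strings)
inductive Key : Type
  | num : Int → Key
  | star : Key
  | hash : Key
deriving DecidableEq, Repr

def numDictA : PySem.Dict Key (List Key) := PySem.Dict.ofList
  [ (Key.num 1, [Key.num 2, Key.num 4]),
    (Key.num 2, [Key.num 1, Key.num 3, Key.num 5]),
    (Key.num 3, [Key.num 2, Key.num 6]),
    (Key.num 4, [Key.num 1, Key.num 5, Key.num 7]),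
    (Key.num 5, [Key.num 2, Key.num 4, Key.num 6, Key.num 8]),
    (Key.num 6, [Key.num 3, Key.num 5, Key.num 9]),
    (Key.num 7, [Key.num 4, Key.num 8, Key.star]),
    (Key.num 8, [Key.num 5, Key.num 7, Key.num 9, Key.num 0]),
    (Key.num 9, [Key.num 6, Key.num 8, Key.hash]),
    (Key.star, [Key.num 7, Key.num 0]),
    (Key.num 0, [Key.num 8, Key.star, Key.hash]),
    (Key.hash, [Key.num 9, Key.num 0]) ]

-- the while-loop of get_distance_bfs; fuel only makes the same computation total
-- (100 exceeds the number of queue pops possible on this 12-key graph); returns none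
-- if the queue empties without reaching obj (Python falls off the loop returning None)
def bfsGo (fuel : Nat) (obj : Key) (visited queue : List Key) (dist : List Int) : Option Int :=
  match fuel with
  | 0 => none
  | fuel + 1 =>
    match queue, dist with
    | [], _ => none
    | _ :: _, [] => none
    | n :: qs, nd :: ds =>
      if n = obj then some nd
      else if visited.contains n then bfsGo fuel obj visited qs ds
      else
        let visited' := visited ++ [n]
        let neigh := (numDictA.getD n []).filter (fun e => !(visited'.contains e))
        bfsGo fuel obj visited' (qs ++ neigh) (ds ++ neigh.map (fun _ => nd + 1))

def getDistanceBfs (now obj : Key) : Option Int :=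
  bfsGo 100 obj [] [now] [0]

-- loop body of A's for-loop, state = (l_pos, r_pos, answer)
def stepA (hand : String) (st : Key × Key × String) (number : Int) : Key × Key × String :=
  let l_pos := st.1
  let r_pos := st.2.1
  let answer := st.2.2
  if number = 1 ∨ number = 4 ∨ number = 7 then  -- number in [1,4,7,'*']: an int never equals '*'
    (Key.num number, r_pos, answer ++ "L")
  else if number = 3 ∨ number = 6 ∨ number = 9 then  -- number in [3,6,9,'#']
    (l_pos, Key.num number, answer ++ "R")
  else
    let l_dist := getDistanceBfs l_pos (Key.num number)
    let r_dist := getDistanceBfs r_pos (Key.num number)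
    if l_dist = r_dist then  -- Python ==: int == int, or None == None (both BFS found nothing)
      if hand == "right" then (l_pos, Key.num number, answer ++ "R")
      else if hand == "left" then (Key.num number, r_pos, answer ++ "L")
      else (l_pos, r_pos, answer)
    -- 'l_dist > r_dist': exact whenever both BFS calls found obj (always under Pre_);
    -- Python raises TypeError comparing None with int, which Pre_ excludes
    else if l_dist.getD 0 > r_dist.getD 0 then (l_pos, Key.num number, answer ++ "R")
    else (Key.num number, r_pos, answer ++ "L")

def solution (numbers : List Int) (hand : String) : String :=
  (numbers.foldl (stepA hand) (Key.star, Key.hash, "")).2.2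

-- ===== PORT B =====

def posDict : PySem.Dict Key (Int × Int) := PySem.Dict.ofList
  [ (Key.num 1, (0, 0)), (Key.num 2, (0, 1)), (Key.num 3, (0, 2)),
    (Key.num 4, (1, 0)), (Key.num 5, (1, 1)), (Key.num 6, (1, 2)),
    (Key.num 7, (2, 0)), (Key.num 8, (2, 1)), (Key.num 9, (2, 2)),
    (Key.star, (3, 0)), (Key.num 0, (3, 1)), (Key.hash, (3, 2)) ]

-- pos[k] on a key that is present (the '*', '#', 1,4,7 / 3,6,9 lookups of Source B); exact there
def coordOf (k : Key) : Int × Int := (posDict.get? k).getD (0, 0)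

-- Source B's dist(q, p): a position is Option (Int × Int) (none = Python None), a distance is
-- Option Int with none playing float('inf'): none = none is true (inf == inf) like Python
def distB (q p : Option (Int × Int)) : Option Int :=
  match q, p with
  | some q, some p => some (|q.1 - p.1| + |q.2 - p.2|)
  | _, _ => none

-- 'ld > rd' on distances where none = float('inf')
def gtB : Option Int → Option Int → Bool
  | none, none => false
  | none, some _ => true
  | some _, none => false
  | some a, some b => a > b

-- loop body of B's for-loop, state = (l, r, answer-list)
def stepB (hand : String) (st : Option (Int × Int) × Option (Int × Int) × List String) (n : Int) :
    Option (Int × Int) × Option (Int × Int) × List String :=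
  let l := st.1
  let r := st.2.1
  let ans := st.2.2
  if n = 1 ∨ n = 4 ∨ n = 7 then (some (coordOf (Key.num n)), r, ans ++ ["L"])
  else if n = 3 ∨ n = 6 ∨ n = 9 then (l, some (coordOf (Key.num n)), ans ++ ["R"])
  else
    let p := posDict.get? (Key.num n)  -- pos.get(n)
    let ld := distB l p
    let rd := distB r p
    if ld = rd then
      if hand == "right" then (l, p, ans ++ ["R"])
      else if hand == "left" then (p, r, ans ++ ["L"])
      else (l, r, ans)
    else if gtB ld rd then (l, p, ans ++ ["R"])
    else (p, r, ans ++ ["L"])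

def solution_alt (numbers : List Int) (hand : String) : String :=
  String.join
    (numbers.foldl (stepB hand) (some (coordOf Key.star), some (coordOf Key.hash), [])).2.2

-- ===== PRECONDITION & SPEC =====
-- Pre_ requires each pressed number to be a keypad key 0..9 unless hand prefers neither side
-- ("left"/"right"); a press outside the keypad with a preferred hand parks that hand on a
-- nonexistent key (A: BFS finds nothing, None == None lands in the tie branch), after which a
-- middle-column press makes A raise KeyError/TypeError, so A's returns there are accidents of the
-- implementation; with no preferred hand such a press moves nothing in either program and stays
-- inside Pre_.
def Pre_solution (numbers : List Int) (hand : String) : Prop :=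
  ∀ n ∈ numbers, (0 ≤ n ∧ n ≤ 9) ∨ (hand ≠ "left" ∧ hand ≠ "right")
instance (numbers : List Int) (hand : String) : Decidable (Pre_solution numbers hand) := by
  unfold Pre_solution; infer_instance

def pvWitness_solution : List Int × String := ([1, 3, 4, 5, 8, 2, 1, 4, 5, 9, 5], "right")

def Spec_solution (numbers : List Int) (hand : String) (out : String) : Prop := out = solution_alt numbers hand
instance (numbers : List Int) (hand : String) (out : String) : Decidable (Spec_solution numbers hand out) := by unfold Spec_solution; infer_instance

-- ===== CLAIM (what is proved, stated in full; the proofs are below) =====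
def Claim_equal_solution : Prop := ∀ (numbers : List Int) (hand : String), Dom_solution numbers hand → Pre_solution numbers hand → Spec_solution numbers hand (solution numbers hand)

-- ===== LEMMAS AND PROOFS =====

def keyList : List Key :=
  [Key.num 0, Key.num 1, Key.num 2, Key.num 3, Key.num 4, Key.num 5, Key.num 6,
   Key.num 7, Key.num 8, Key.num 9, Key.star, Key.hash]

-- BFS on the keypad graph computes exactly the grid Manhattan distance
lemma dist_eq : ∀ k ∈ keyList, ∀ m ∈ ([0, 2, 5, 8] : List Int),
    getDistanceBfs k (Key.num m) =
      some (|(coordOf k).1 - (coordOf (Key.num m)).1| + |(coordOf k).2 - (coordOf (Key.num m)).2|) := by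
  decide

-- every key on the keypad has a coordinate
lemma coordO_valid : ∀ k ∈ keyList, posDict.get? k = some (coordOf k) := by decide

-- adjacency lists only contain keypad keys
lemma adj_sub : ∀ k ∈ keyList, ∀ v ∈ numDictA.getD k [], v ∈ keyList := by decide

lemma key_ne_invalid (m : Int) (hm : ¬ (0 ≤ m ∧ m ≤ 9)) : ∀ k ∈ keyList, k ≠ Key.num m := by
  intro k hk
  fin_cases hk <;> simp <;> omega

-- BFS never reaches a key that is not on the keypad
lemma bfsGo_invalid (m : Int) (hm : ¬ (0 ≤ m ∧ m ≤ 9)) :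
    ∀ (fuel : Nat) (visited queue : List Key) (dist : List Int),
      (∀ x ∈ queue, x ∈ keyList) → bfsGo fuel (Key.num m) visited queue dist = none := by
  intro fuel
  induction fuel with
  | zero => intro _ _ _ _; rfl
  | succ fuel ih =>
    intro visited queue dist hq
    match queue, dist with
    | [], _ => rfl
    | _ :: _, [] => rfl
    | n :: qs, nd :: ds =>
      have hn : n ∈ keyList := hq n (by simp)
      have hne : n ≠ Key.num m := key_ne_invalid m hm n hn
      simp only [bfsGo, if_neg hne]
      split
      · exact ih visited qs ds (fun x hx => hq x (by simp [hx]))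
      · refine ih _ _ _ ?_
        intro x hx
        rcases List.mem_append.1 hx with h | h
        · exact hq x (by simp [h])
        · exact adj_sub n hn x (List.mem_of_mem_filter h)

lemma bfs_invalid (m : Int) (hm : ¬ (0 ≤ m ∧ m ≤ 9)) (k : Key) (hk : k ∈ keyList) :
    getDistanceBfs k (Key.num m) = none :=
  bfsGo_invalid m hm 100 [] [k] [0] (by intro x hx; simp at hx; simpa [hx])

-- a number outside 0..9 has no coordinate
lemma coordO_invalid (m : Int) (hm : ¬ (0 ≤ m ∧ m ≤ 9)) : posDict.get? (Key.num m) = none := by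
  have h0 : ¬ (m = (0:Int)) := by omega
  have h1 : ¬ (m = (1:Int)) := by omega
  have h2 : ¬ (m = (2:Int)) := by omega
  have h3 : ¬ (m = (3:Int)) := by omega
  have h4 : ¬ (m = (4:Int)) := by omega
  have h5 : ¬ (m = (5:Int)) := by omega
  have h6 : ¬ (m = (6:Int)) := by omega
  have h7 : ¬ (m = (7:Int)) := by omega
  have h8 : ¬ (m = (8:Int)) := by omega
  have h9 : ¬ (m = (9:Int)) := by omega
  simp [posDict, PySem.Dict.ofList, PySem.Dict.update, List.foldl, PySem.Dict.get?_insert,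
    Key.num.injEq, h0, h1, h2, h3, h4, h5, h6, h7, h8, h9, PySem.Dict.get?_empty]

lemma join_snoc (xs : List String) (x : String) :
    String.join (xs ++ [x]) = String.join xs ++ x := by
  simp [String.join, List.foldl_append]

lemma mid_eq (hand : String) (l r : Key) (hl : l ∈ keyList) (hr : r ∈ keyList)
    (m : Int) (hm : m ∈ ([0, 2, 5, 8] : List Int)) (hkm : Key.num m ∈ keyList)
    (hno1 : ¬(m = 1 ∨ m = 4 ∨ m = 7)) (hno3 : ¬(m = 3 ∨ m = 6 ∨ m = 9)) (lst : List String) :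
    ∃ l' r' lst', l' ∈ keyList ∧ r' ∈ keyList ∧
      stepA hand (l, r, String.join lst) m = (l', r', String.join lst') ∧
      stepB hand (posDict.get? l, posDict.get? r, lst) m = (posDict.get? l', posDict.get? r', lst') := by
  have hA := dist_eq l hl m hm
  have hB := dist_eq r hr m hm
  have hcm : posDict.get? (Key.num m) = some (coordOf (Key.num m)) := coordO_valid _ hkm
  simp only [stepA, stepB]
  rw [if_neg hno1, if_neg hno3, if_neg hno1, if_neg hno3, hA, hB,
    coordO_valid l hl, coordO_valid r hr, hcm]
  simp only [distB, gtB, Option.some.injEq, Option.getD_some, decide_eq_true_eq]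
  split_ifs with hab hhr hhl hgt
  · exact ⟨l, Key.num m, lst ++ ["R"], hl, hkm, by rw [join_snoc], by rw [hcm, coordO_valid l hl]⟩
  · exact ⟨Key.num m, r, lst ++ ["L"], hkm, hr, by rw [join_snoc], by rw [hcm, coordO_valid r hr]⟩
  · exact ⟨l, r, lst, hl, hr, rfl, by rw [coordO_valid l hl, coordO_valid r hr]⟩
  · exact ⟨l, Key.num m, lst ++ ["R"], hl, hkm, by rw [join_snoc], by rw [hcm, coordO_valid l hl]⟩
  · exact ⟨Key.num m, r, lst ++ ["L"], hkm, hr, by rw [join_snoc], by rw [hcm, coordO_valid r hr]⟩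

lemma step_eq (hand : String) (l r : Key) (hl : l ∈ keyList) (hr : r ∈ keyList)
    (n : Int) (hn : (0 ≤ n ∧ n ≤ 9) ∨ (hand ≠ "left" ∧ hand ≠ "right")) (lst : List String) :
    ∃ l' r' lst', l' ∈ keyList ∧ r' ∈ keyList ∧
      stepA hand (l, r, String.join lst) n = (l', r', String.join lst') ∧
      stepB hand (posDict.get? l, posDict.get? r, lst) n = (posDict.get? l', posDict.get? r', lst') := by
  by_cases hv : 0 ≤ n ∧ n ≤ 9
  · obtain ⟨h0, h9⟩ := hv
    interval_cases n
    · exact mid_eq hand l r hl hr 0 (by norm_num) (by simp [keyList]) (by norm_num) (by norm_num) lst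
    · exact ⟨Key.num 1, r, lst ++ ["L"], by simp [keyList], hr, by simp [stepA, join_snoc],
        by simp [stepB]; decide⟩
    · exact mid_eq hand l r hl hr 2 (by norm_num) (by simp [keyList]) (by norm_num) (by norm_num) lst
    · exact ⟨l, Key.num 3, lst ++ ["R"], hl, by simp [keyList], by simp [stepA, join_snoc],
        by simp [stepB]; decide⟩
    · exact ⟨Key.num 4, r, lst ++ ["L"], by simp [keyList], hr, by simp [stepA, join_snoc],
        by simp [stepB]; decide⟩
    · exact mid_eq hand l r hl hr 5 (by norm_num) (by simp [keyList]) (by norm_num) (by norm_num) lst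
    · exact ⟨l, Key.num 6, lst ++ ["R"], hl, by simp [keyList], by simp [stepA, join_snoc],
        by simp [stepB]; decide⟩
    · exact ⟨Key.num 7, r, lst ++ ["L"], by simp [keyList], hr, by simp [stepA, join_snoc],
        by simp [stepB]; decide⟩
    · exact mid_eq hand l r hl hr 8 (by norm_num) (by simp [keyList]) (by norm_num) (by norm_num) lst
    · exact ⟨l, Key.num 9, lst ++ ["R"], hl, by simp [keyList], by simp [stepA, join_snoc],
        by simp [stepB]; decide⟩
  · -- press outside the keypad, hand prefers neither side: both programs do nothing
    obtain ⟨hleft, hright⟩ := hn.resolve_left hv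
    have hno1 : ¬(n = 1 ∨ n = 4 ∨ n = 7) := by omega
    have hno3 : ¬(n = 3 ∨ n = 6 ∨ n = 9) := by omega
    refine ⟨l, r, lst, hl, hr, ?_, ?_⟩
    · simp only [stepA]
      rw [if_neg hno1, if_neg hno3, bfs_invalid n hv l hl, bfs_invalid n hv r hr]
      simp [hleft, hright]
    · simp only [stepB]
      rw [if_neg hno1, if_neg hno3, coordO_invalid n hv]
      have hldB : distB (posDict.get? l) none = none := by
        rw [coordO_valid l hl]; rfl
      have hrdB : distB (posDict.get? r) none = none := by
        rw [coordO_valid r hr]; rfl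
      rw [hldB, hrdB]
      simp [hleft, hright]

lemma loop_eq (hand : String) : ∀ (ns : List Int) (l r : Key) (lst : List String),
    l ∈ keyList → r ∈ keyList →
    (∀ n ∈ ns, (0 ≤ n ∧ n ≤ 9) ∨ (hand ≠ "left" ∧ hand ≠ "right")) →
    (ns.foldl (stepA hand) (l, r, String.join lst)).2.2 =
      String.join (ns.foldl (stepB hand) (posDict.get? l, posDict.get? r, lst)).2.2
  | [], l, r, lst, _, _, _ => rfl
  | n :: ns, l, r, lst, hl, hr, hb => by
    obtain ⟨l', r', lst', hl', hr', hA, hB⟩ :=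
      step_eq hand l r hl hr n (hb n (by simp)) lst
    simp only [List.foldl_cons, hA, hB]
    exact loop_eq hand ns l' r' lst' hl' hr' (fun m hm => hb m (by simp [hm]))

-- ===== VERDICT (by name: the statement is the Claim_ definition above) =====
theorem solution_spec : Claim_equal_solution := by
  intro numbers hand _ hpre
  unfold Spec_solution solution solution_alt
  have h := loop_eq hand numbers Key.star Key.hash []
    (by simp [keyList]) (by simp [keyList]) hpre
  rw [coordO_valid Key.star (by simp [keyList]), coordO_valid Key.hash (by simp [keyList])] at h
  exact h
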